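-- pv_equiv track=rewrite | github.com/ahmed-100100/sudoku-solver | functional/utils_functional.py | box_values
-- ===== SOURCE A (Python) =====
-- from typing import Tuple, List, Callable, TypeVar
--
-- Board = Tuple[Tuple[int, ...], ...]                # immutable 9x9 board
--
-- T = TypeVar('T')
--
-- def custom_filter(predicate: Callable[[T], bool], items) -> Tuple[T, ...]:
--     """
--     custom_filter retains only those elements from `items` for which the
--     function `predicate` returns True. Like the built-in filter, but
--     always returns a tuple, not an iterator.
--
--     Example:
--         custom_filter(lambda x: x > 0, [-1, 0, 1, 2])  # returns (1, 2)
--     """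
--     items_tuple = tuple(items)
--     if not items_tuple:
--         return ()
--     head, *tail = items_tuple
--     filtered_tail = custom_filter(predicate, tail)
--     if predicate(head):
--         return (head,) + filtered_tail
--     return filtered_tail
--
-- def box_values(board: Board, r: int, c: int) -> Tuple[int, ...]:
--     """Get all non-zero values from the 3x3 box containing cell (r, c)"""
--     br, bc = (r // 3) * 3, (c // 3) * 3
--
--     # Recursive helper to collect box values row by row
--     def collect_rows(row_idx: int) -> Tuple[int, ...]:
--         if row_idx >= br + 3:
--             return ()  # base case: no more rows
--         # Get values from current row in the box, filter non-zeros via custom_filter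
--         row_vals = custom_filter(
--             lambda v: v != 0,
--             tuple(board[row_idx][col] for col in range(bc, bc + 3))
--         )
--         # Recursively process remaining rows and concatenate
--         return row_vals + collect_rows(row_idx + 1)
--
--     return collect_rows(br)
-- ===== SOURCE B (Python) =====
-- def box_values(board, r, c):
--     """Get all non-zero values from the 3x3 box containing cell (r, c)"""
--     br, bc = (r // 3) * 3, (c // 3) * 3
--     return tuple(board[i][j]
--                  for i in range(br, br + 3)
--                  for j in range(bc, bc + 3)
--                  if board[i][j] != 0)
-- ===== Notes on version B (the rewrite author's own statement) =====
-- stated objective: simpler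
-- what changed: Replaces the two recursive helpers (row recursion plus a recursive custom_filter) with a single flat generator comprehension over the 3x3 index ranges, filtering non-zeros inline in the same row-major order.
import Mathlib
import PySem

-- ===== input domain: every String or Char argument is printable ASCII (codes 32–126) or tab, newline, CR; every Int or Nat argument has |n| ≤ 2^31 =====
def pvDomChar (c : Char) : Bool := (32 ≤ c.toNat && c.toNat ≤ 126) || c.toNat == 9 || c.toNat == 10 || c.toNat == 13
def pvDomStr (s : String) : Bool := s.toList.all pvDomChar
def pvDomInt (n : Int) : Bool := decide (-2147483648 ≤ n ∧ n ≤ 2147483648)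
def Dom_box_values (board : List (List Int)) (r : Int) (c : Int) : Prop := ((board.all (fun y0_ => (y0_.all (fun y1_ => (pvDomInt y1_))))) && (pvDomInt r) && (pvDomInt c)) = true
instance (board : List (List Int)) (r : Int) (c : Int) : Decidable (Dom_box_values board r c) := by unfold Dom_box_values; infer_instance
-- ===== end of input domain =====

-- B replaces A's two recursive helpers by one flat comprehension over the 3x3 ranges (simpler, same order).

-- ===== PORT A =====
-- custom_filter specialised to A's only predicate (v != 0), as A's recursion
def customFilterNZ : List Int → List Int
  | [] => []
  | h :: t =>
    let ft := customFilterNZ t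
    if h ≠ 0 then h :: ft else ft

-- collect_rows: row_idx counts up from br until br+3; the fuel n = (br+3) - row_idx (3 at the call)
def collectRows (board : List (List Int)) (bc : Int) : Int → Nat → List Int
  | _, 0 => []
  | i, n+1 =>
    customFilterNZ ((PySem.List.pyRange bc (bc+3) 1).map
      (fun j => PySem.List.pyGetD (PySem.List.pyGetD board i []) j 0))
    ++ collectRows board bc (i+1) n

def box_values (board : List (List Int)) (r : Int) (c : Int) : List Int :=
  let br := PySem.Int.floordiv r 3 * 3
  let bc := PySem.Int.floordiv c 3 * 3
  collectRows board bc br 3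

-- ===== PORT B =====
def box_values_alt (board : List (List Int)) (r : Int) (c : Int) : List Int :=
  let br := PySem.Int.floordiv r 3 * 3
  let bc := PySem.Int.floordiv c 3 * 3
  (PySem.List.pyRange br (br+3) 1).foldl (fun acc i =>
    (PySem.List.pyRange bc (bc+3) 1).foldl (fun acc2 j =>
      let v := PySem.List.pyGetD (PySem.List.pyGetD board i []) j 0
      if v ≠ 0 then acc2 ++ [v] else acc2) acc) []

-- ===== PRECONDITION & SPEC =====
-- Pre_ excludes exactly the inputs where Python A raises IndexError: some cell of the
-- 3x3 box (Python negative-index semantics included) is out of range.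
def Pre_box_values (board : List (List Int)) (r : Int) (c : Int) : Prop :=
  ∀ i ∈ PySem.List.pyRange (PySem.Int.floordiv r 3 * 3) (PySem.Int.floordiv r 3 * 3 + 3) 1,
    (PySem.List.pyGet? board i).isSome = true ∧
    ∀ j ∈ PySem.List.pyRange (PySem.Int.floordiv c 3 * 3) (PySem.Int.floordiv c 3 * 3 + 3) 1,
      (PySem.List.pyGet? ((PySem.List.pyGet? board i).getD []) j).isSome = true
instance (board : List (List Int)) (r : Int) (c : Int) : Decidable (Pre_box_values board r c) := by unfold Pre_box_values; infer_instance

def pvWitness_box_values : List (List Int) × Int × Int :=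
  ([[5,0,0,1,2,3,0,0,0],[0,7,0,4,5,6,0,0,0],[0,0,9,7,8,9,0,0,0],
    [1,1,1,0,0,0,2,2,2],[1,1,1,0,0,0,2,2,2],[1,1,1,0,0,0,2,2,2],
    [0,0,0,3,3,3,0,0,0],[0,0,0,3,3,3,0,0,0],[0,0,0,3,3,3,0,0,0]], 4, 7)

def Spec_box_values (board : List (List Int)) (r : Int) (c : Int) (out : List Int) : Prop := out = box_values_alt board r c
instance (board : List (List Int)) (r : Int) (c : Int) (out : List Int) : Decidable (Spec_box_values board r c out) := by unfold Spec_box_values; infer_instance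

-- ===== CLAIM (what is proved, stated in full; the proofs are below) =====
def Claim_equal_box_values : Prop := ∀ (board : List (List Int)) (r : Int) (c : Int), Dom_box_values board r c → Pre_box_values board r c → Spec_box_values board r c (box_values board r c)

-- ===== LEMMAS AND PROOFS =====

-- inner fold (one row of B) = acc ++ custom_filter of the mapped row (A's row_vals)
theorem foldl_if_eq_customFilterNZ (f : Int → Int) :
    ∀ (l : List Int) (acc : List Int),
      l.foldl (fun a j => if f j ≠ 0 then a ++ [f j] else a) acc
        = acc ++ customFilterNZ (l.map f)
  | [], acc => by simp [customFilterNZ]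
  | x :: t, acc => by
    simp only [List.foldl_cons, List.map_cons, customFilterNZ]
    rw [foldl_if_eq_customFilterNZ f t]
    by_cases h : f x = 0 <;> simp [h]

-- outer fold (rows of B) = acc ++ A's collect_rows, for any fuel n and start i
theorem foldl_rows_eq_collectRows (board : List (List Int)) (bc : Int) (n : Nat) :
    ∀ (i : Int) (acc : List Int),
      (PySem.List.pyRange i (i + (n : Int)) 1).foldl (fun a k =>
        (PySem.List.pyRange bc (bc+3) 1).foldl (fun a2 j =>
          let v := PySem.List.pyGetD (PySem.List.pyGetD board k []) j 0
          if v ≠ 0 then a2 ++ [v] else a2) a) acc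
        = acc ++ collectRows board bc i n := by
  induction n with
  | zero =>
    intro i acc
    have hnil : PySem.List.pyRange i (i + ((0:Nat):Int)) 1 = [] :=
      PySem.List.pyRange_one_eq_nil (by omega)
    rw [hnil]
    simp [collectRows]
  | succ n ih =>
    intro i acc
    have hcons : PySem.List.pyRange i (i + ((n+1:Nat):Int)) 1
          = i :: PySem.List.pyRange (i+1) (i + ((n+1:Nat):Int)) 1 :=
      PySem.List.pyRange_one_cons (by push_cast; omega)
    rw [hcons, show (i + ((n+1:Nat):Int)) = (i+1) + ((n:Nat):Int) by push_cast; ring]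
    simp only [List.foldl_cons]
    rw [foldl_if_eq_customFilterNZ (fun j => PySem.List.pyGetD (PySem.List.pyGetD board i []) j 0)]
    rw [ih (i+1)]
    simp [collectRows]

-- ===== VERDICT (by name: the statement is the Claim_ definition above) =====
theorem box_values_spec : Claim_equal_box_values := by
  intro board r c _ _
  show box_values board r c = box_values_alt board r c
  unfold box_values box_values_alt
  have h := foldl_rows_eq_collectRows board (PySem.Int.floordiv c 3 * 3) 3
    (PySem.Int.floordiv r 3 * 3) []
  simp only [List.nil_append] at h
  rw [show ((3:Nat):Int) = (3:Int) by norm_num] at h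
  exact h.symm
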